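-- pv_equiv track=rewrite | github.com/cct08311github/ai-trader | src/openclaw/network_allowlist.py | _parse_allowlist
-- ===== SOURCE A (Python) =====
-- from typing import List, Optional
--
-- def _parse_allowlist(raw: str | None) -> List[str]:
--     if not raw:
--         return []
--     # allow commas, spaces, newlines
--     parts: List[str] = []
--     for chunk in raw.replace("\n", ",").split(","):
--         chunk = chunk.strip()
--         if not chunk:
--             continue
--         parts.extend([p for p in chunk.split() if p.strip()])
--     return parts
-- ===== SOURCE B (Python) =====
-- from typing import List, Optional
--
-- def _parse_allowlist(raw: "str | None") -> List[str]:
--     if not raw: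
--         return []
--     # commas become spaces; argument-less split() collapses all whitespace
--     return raw.replace(",", " ").split()
-- ===== Notes on version B (the rewrite author's own statement) =====
-- stated objective: simpler
-- what changed: Replaces the two-level split (newline->comma substitution, split on commas, strip/skip each chunk, whitespace-split each chunk with a redundant filter) by normalizing commas to spaces and a single argument-less str.split().
import Mathlib
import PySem

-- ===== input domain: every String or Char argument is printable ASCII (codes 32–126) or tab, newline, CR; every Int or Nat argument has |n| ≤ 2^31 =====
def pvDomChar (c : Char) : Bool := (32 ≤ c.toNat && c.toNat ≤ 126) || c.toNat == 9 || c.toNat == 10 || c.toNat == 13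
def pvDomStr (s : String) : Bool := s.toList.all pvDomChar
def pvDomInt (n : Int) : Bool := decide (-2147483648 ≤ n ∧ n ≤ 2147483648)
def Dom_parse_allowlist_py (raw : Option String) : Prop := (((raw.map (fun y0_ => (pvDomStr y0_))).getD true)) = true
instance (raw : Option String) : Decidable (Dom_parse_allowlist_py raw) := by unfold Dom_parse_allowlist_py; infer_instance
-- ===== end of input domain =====

-- B replaces A's two-level split (newline→comma, split on commas, strip and whitespace-split each
-- chunk) by one comma→space normalization followed by a single argument-less split(): simpler.

-- ===== PORT A =====
def parse_allowlist_py (raw : Option String) : List String :=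
  match raw with
  | none => []
  | some s =>
    if s = "" then []            -- `if not raw` is also true for the empty string
    else
      -- for chunk in raw.replace("\n", ",").split(","): …
      ((PySem.Chars.splitOn (PySem.Str.replace s "\n" ",").toList [',']).foldl
        (fun parts chunk =>
          let chunk := PySem.Chars.strip chunk
          if chunk.isEmpty then parts
          else parts ++
            ((PySem.Chars.split₀ chunk).filter
              (fun p => !(PySem.Chars.strip p).isEmpty)).map String.ofList) [])

-- ===== PORT B =====
def parse_allowlist_py_alt (raw : Option String) : List String :=
  match raw with
  | none => []
  | some s =>
    if s = "" then []
    else PySem.Str.split₀ (PySem.Str.replace s "," " ")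

-- ===== PRECONDITION & SPEC =====
def Spec_parse_allowlist_py (raw : Option String) (out : List String) : Prop := out = parse_allowlist_py_alt raw
instance (raw : Option String) (out : List String) : Decidable (Spec_parse_allowlist_py raw out) := by unfold Spec_parse_allowlist_py; infer_instance

-- ===== CLAIM (what is proved, stated in full; the proofs are below) =====
def Claim_equal_parse_allowlist_py : Prop := ∀ (raw : Option String), Dom_parse_allowlist_py raw → Spec_parse_allowlist_py raw (parse_allowlist_py raw)

-- ===== LEMMAS AND PROOFS =====

-- the word list of a character list: maximal runs of non-delimiter characters (delimiters = pr)
def pvWords (pr : Char → Bool) : List Char → List (List Char)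
  | [] => []
  | c :: r =>
    if pr c then pvWords pr r
    else (c :: r.takeWhile (fun d => !pr d)) :: pvWords pr (r.dropWhile (fun d => !pr d))
termination_by l => l.length
decreasing_by
  all_goals simp only [List.length_cons]
  · omega
  · have := List.length_dropWhile_le (fun d => !pr d) r; omega

-- the comma-separated chunks of a character list (split on ',', empties kept)
def pvChunks : List Char → List (List Char)
  | [] => [[]]
  | c :: r => if c == ',' then [] :: pvChunks r else (pvChunks r).modifyHead (c :: ·)

-- the combined delimiter set: whitespace or comma
def pvQ (c : Char) : Bool := PySem.Chars.isspace c || c == ','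

theorem pvWords_nil (pr : Char → Bool) : pvWords pr [] = [] := by simp [pvWords]

theorem pvWords_cons (pr : Char → Bool) (c : Char) (r : List Char) :
    pvWords pr (c :: r) =
      if pr c then pvWords pr r
      else (c :: r.takeWhile (fun d => !pr d)) :: pvWords pr (r.dropWhile (fun d => !pr d)) := by
  simp [pvWords]

theorem pvTakeWhile_congr {α : Type} (p q : α → Bool) :
    ∀ (l : List α), (∀ c ∈ l, p c = q c) → l.takeWhile p = l.takeWhile q
  | [], _ => rfl
  | c :: r, h => by
    simp only [List.takeWhile_cons, h c (by simp)]
    split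
    · rw [pvTakeWhile_congr p q r (fun d hd => h d (by simp [hd]))]
    · rfl

theorem pvDropWhile_congr {α : Type} (p q : α → Bool) :
    ∀ (l : List α), (∀ c ∈ l, p c = q c) → l.dropWhile p = l.dropWhile q
  | [], _ => rfl
  | c :: r, h => by
    simp only [List.dropWhile_cons, h c (by simp)]
    split
    · exact pvDropWhile_congr p q r (fun d hd => h d (by simp [hd]))
    · rfl

theorem pvWords_congr (p q : Char → Bool) :
    ∀ (l : List Char), (∀ c ∈ l, p c = q c) → pvWords p l = pvWords q l
  | [], _ => by simp [pvWords]
  | c :: r, h => by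
    have hmem : ∀ d ∈ r, p d = q d := fun d hd => h d (by simp [hd])
    have htw : r.takeWhile (fun d => !p d) = r.takeWhile (fun d => !q d) :=
      pvTakeWhile_congr _ _ r (fun d hd => by rw [hmem d hd])
    have hdw : r.dropWhile (fun d => !p d) = r.dropWhile (fun d => !q d) :=
      pvDropWhile_congr _ _ r (fun d hd => by rw [hmem d hd])
    have hlen := List.length_dropWhile_le (fun d => !p d) r
    have ih1 := pvWords_congr p q r hmem
    have ih2 := pvWords_congr p q (r.dropWhile (fun d => !p d))
      (fun d hd => hmem d ((List.dropWhile_sublist (l := r) (p := fun d => !p d)).subset hd))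
    simp only [pvWords, h c (by simp), htw, hdw] at *
    split <;> simp [ih1, ih2, hdw]
termination_by l => l.length
decreasing_by
  all_goals simp only [List.length_cons]
  · omega
  · have := List.length_dropWhile_le (fun d => !p d) r; omega

theorem pvTakeWhile_all {α : Type} (p : α → Bool) :
    ∀ (a : List α), (∀ c ∈ a, p c = true) → ∀ x, (a ++ x).takeWhile p = a ++ x.takeWhile p
  | [], _, x => rfl
  | c :: r, h, x => by
    simp only [List.cons_append, List.takeWhile_cons, h c (by simp), if_true]
    rw [pvTakeWhile_all p r (fun d hd => h d (by simp [hd])) x]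

theorem pvDropWhile_all {α : Type} (p : α → Bool) :
    ∀ (a : List α), (∀ c ∈ a, p c = true) → ∀ x, (a ++ x).dropWhile p = x.dropWhile p
  | [], _, x => rfl
  | c :: r, h, x => by
    simp only [List.cons_append, List.dropWhile_cons, h c (by simp)]
    exact pvDropWhile_all p r (fun d hd => h d (by simp [hd])) x

theorem pvDropWhile_head {α : Type} (p : α → Bool) :
    ∀ (a : List α) (e : α) (v : List α), a.dropWhile p = e :: v → p e = false
  | [], e, v, h => by simp at h
  | c :: r, e, v, h => by
    by_cases hc : p c = true
    · simp [List.dropWhile_cons, hc] at h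
      exact pvDropWhile_head p r e v h
    · simp [List.dropWhile_cons, hc] at h
      simpa [← h.1] using hc

-- a delimiter splits the word list in two
theorem pvWords_append_delim (q : Char → Bool) (d : Char) (hd : q d = true) :
    ∀ (a b : List Char), pvWords q (a ++ d :: b) = pvWords q a ++ pvWords q b
  | [], b => by simp [pvWords, hd]
  | c :: a', b => by
    by_cases hc : q c = true
    · simp only [List.cons_append, pvWords, hc, if_true]
      exact pvWords_append_delim q d hd a' b
    · rcases hv : a'.dropWhile (fun e => !q e) with _ | ⟨e, v'⟩
      · -- a' is all non-delimiters
        have hall : ∀ x ∈ a', (fun e => !q e) x = true := by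
          intro x hx
          have : a'.takeWhile (fun e => !q e) = a' := by
            have := List.takeWhile_append_dropWhile (p := fun e => !q e) (l := a')
            simpa [hv] using this
          rw [← this] at hx
          exact List.mem_takeWhile_imp (p := fun e => !q e) hx
        have htw : (a' ++ d :: b).takeWhile (fun e => !q e) = a' := by
          rw [pvTakeWhile_all _ a' hall]
          simp [List.takeWhile_cons, hd]
        have hdw : (a' ++ d :: b).dropWhile (fun e => !q e) = d :: b := by
          rw [pvDropWhile_all _ a' hall]
          simp [List.dropWhile_cons, hd]
        have htw' : a'.takeWhile (fun e => !q e) = a' := by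
          have := List.takeWhile_append_dropWhile (p := fun e => !q e) (l := a')
          simpa [hv] using this
        simp [pvWords, hc, htw, hdw, htw', hv, hd]
      · -- a' contains a delimiter
        have hlen : v'.length < a'.length + 1 := by
          have h1 := List.length_dropWhile_le (fun e => !q e) a'
          rw [hv] at h1; simp at h1; omega
        have hu := List.takeWhile_append_dropWhile (p := fun e => !q e) (l := a')
        have hallu : ∀ x ∈ a'.takeWhile (fun e => !q e), (fun e => !q e) x = true := by
          intro x hx; exact List.mem_takeWhile_imp (p := fun e => !q e) hx
        have he : q e = true := by
          have := pvDropWhile_head (fun e => !q e) a' e v' hv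
          simpa using this
        have htw : (a' ++ d :: b).takeWhile (fun e => !q e) = a'.takeWhile (fun e => !q e) := by
          conv_lhs => rw [← hu]
          rw [List.append_assoc, pvTakeWhile_all _ _ hallu, hv]
          simp [List.takeWhile_cons, he]
        have hdw : (a' ++ d :: b).dropWhile (fun e => !q e) = e :: (v' ++ d :: b) := by
          conv_lhs => rw [← hu]
          rw [List.append_assoc, pvDropWhile_all _ _ hallu, hv]
          simp [List.dropWhile_cons, he]
        have ih := pvWords_append_delim q d hd (e :: v') b
        rw [List.cons_append, pvWords_cons, if_neg (by simp [hc]), htw, hdw,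
            show e :: (v' ++ d :: b) = (e :: v') ++ d :: b from rfl, ih,
            pvWords_cons (pr := q) (c := c) (r := a'), if_neg (by simp [hc]), hv]
        simp
termination_by a _ => a.length
decreasing_by
  · simp only [List.length_cons]; omega
  · simp only [List.length_cons]
    have h1 := List.length_dropWhile_le (fun e => !q e) a'
    rw [hv] at h1; simp at h1; omega

theorem pvWords_nil_of_all (q : Char → Bool) :
    ∀ (l : List Char), (∀ c ∈ l, q c = true) → pvWords q l = []
  | [], _ => by simp [pvWords]
  | c :: r, h => by
    simp only [pvWords, h c (by simp)]
    exact pvWords_nil_of_all q r (fun d hd => h d (by simp [hd]))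

theorem pvWords_append_sp (q : Char → Bool) (a sp : List Char)
    (h : ∀ c ∈ sp, q c = true) : pvWords q (a ++ sp) = pvWords q a := by
  cases sp with
  | nil => simp
  | cons d sp' =>
    rw [pvWords_append_delim q d (h d (by simp)) a sp',
        pvWords_nil_of_all q sp' (fun c hc => h c (by simp [hc]))]
    simp

theorem pvWords_dropWhile (q : Char → Bool) :
    ∀ (l : List Char), pvWords q (l.dropWhile q) = pvWords q l
  | [] => rfl
  | c :: r => by
    by_cases hc : q c = true
    · simp only [List.dropWhile_cons, hc, if_true]
      rw [pvWords_dropWhile q r]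
      simp [pvWords, hc]
    · simp [List.dropWhile_cons, hc]

-- words are invariant under strip
theorem pvWords_strip (q : Char → Bool)
    (hq : ∀ c, PySem.Chars.isspace c = true → q c = true) (l : List Char) :
    pvWords q (PySem.Chars.strip l) = pvWords q l := by
  unfold PySem.Chars.strip PySem.Chars.rstrip PySem.Chars.lstrip
  set m := l.dropWhile PySem.Chars.isspace with hm
  have hdecomp : m = (m.reverse.dropWhile PySem.Chars.isspace).reverse
      ++ (m.reverse.takeWhile PySem.Chars.isspace).reverse := by
    rw [← List.reverse_append, List.takeWhile_append_dropWhile, List.reverse_reverse]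
  have hall : ∀ c ∈ (m.reverse.takeWhile PySem.Chars.isspace).reverse, q c = true := by
    intro c hc
    rw [List.mem_reverse] at hc
    exact hq c (List.mem_takeWhile_imp hc)
  have h1 : pvWords q ((m.reverse.dropWhile PySem.Chars.isspace).reverse) = pvWords q m := by
    conv_rhs => rw [hdecomp]
    rw [pvWords_append_sp q _ _ hall]
  rw [h1, hm]
  have h2 : ∀ (l : List Char), pvWords q (l.dropWhile PySem.Chars.isspace) = pvWords q l := by
    intro l
    induction l with
    | nil => rfl
    | cons c r ih =>
      by_cases hc : PySem.Chars.isspace c = true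
      · simp only [List.dropWhile_cons, hc, if_true, ih]
        simp [pvWords, hq c hc]
      · simp [List.dropWhile_cons, hc]
  exact h2 l

-- every word is nonempty and free of delimiters
theorem pvWords_mem (q : Char → Bool) :
    ∀ (l : List Char), ∀ w ∈ pvWords q l, w ≠ [] ∧ ∀ c ∈ w, q c = false
  | [], w, hw => by simp [pvWords_nil] at hw
  | c :: r, w, hw => by
    by_cases hc : q c = true
    · rw [pvWords_cons, if_pos hc] at hw
      exact pvWords_mem q r w hw
    · rw [pvWords_cons, if_neg (by simp [hc])] at hw
      rw [List.mem_cons] at hw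
      rcases hw with hw | hw
      · subst hw
        refine ⟨by simp, ?_⟩
        intro d hd
        rcases List.mem_cons.mp hd with h | h
        · subst h; simpa using hc
        · have := List.mem_takeWhile_imp h; simpa using this
      · exact pvWords_mem q (r.dropWhile (fun d => !q d)) w hw
termination_by l => l.length
decreasing_by
  all_goals simp only [List.length_cons]
  · omega
  · have := List.length_dropWhile_le (fun d => !q d) r; omega

theorem pvDropWhile_eq_self {α : Type} (p : α → Bool) (l : List α)
    (h : ∀ c ∈ l, p c = false) : l.dropWhile p = l := by
  cases l with
  | nil => rfl
  | cons c r => simp [List.dropWhile_cons, h c (by simp)]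

theorem pvStrip_eq_self (w : List Char)
    (h : ∀ c ∈ w, PySem.Chars.isspace c = false) : PySem.Chars.strip w = w := by
  unfold PySem.Chars.strip PySem.Chars.lstrip PySem.Chars.rstrip
  rw [pvDropWhile_eq_self _ w h,
      pvDropWhile_eq_self _ w.reverse (fun c hc => h c (List.mem_reverse.mp hc)),
      List.reverse_reverse]

-- split₀ computes pvWords isspace
theorem pvSplit₀_go (l cur acc : List Char) (accs : List (List Char)) :
    PySem.Chars.split₀.go l cur accs =
      accs.reverse ++
        (if cur.isEmpty then pvWords PySem.Chars.isspace l
         else (cur.reverse ++ l.takeWhile (fun d => !PySem.Chars.isspace d)) ::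
              pvWords PySem.Chars.isspace (l.dropWhile (fun d => !PySem.Chars.isspace d))) := by
  clear acc
  induction l generalizing cur accs with
  | nil =>
    cases cur <;> simp [PySem.Chars.split₀.go, pvWords]
  | cons c r ih =>
    by_cases hc : PySem.Chars.isspace c = true
    · cases hcur : cur.isEmpty
      · have hcur' : cur ≠ [] := by cases cur <;> simp_all
        simp only [PySem.Chars.split₀.go, hc, if_true, hcur, Bool.false_eq_true, if_false]
        rw [ih]
        simp [pvWords, hc, List.takeWhile_cons, List.dropWhile_cons]
      · have hcur' : cur = [] := by cases cur <;> simp_all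
        subst hcur'
        simp only [PySem.Chars.split₀.go, hc, if_true, List.isEmpty_nil]
        rw [ih]
        simp [pvWords, hc]
    · simp only [PySem.Chars.split₀.go, hc, Bool.false_eq_true, if_false]
      rw [ih]
      cases hcur : cur.isEmpty
      · have : (c :: cur).isEmpty = false := by simp
        simp only [this, Bool.false_eq_true, if_false, hcur]
        have hcur' : cur ≠ [] := by cases cur <;> simp_all
        simp [pvWords, hc, List.takeWhile_cons, List.dropWhile_cons]
      · have hcur' : cur = [] := by cases cur <;> simp_all
        subst hcur'
        simp [pvWords, hc, List.takeWhile_cons, List.dropWhile_cons]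

theorem pvSplit₀_eq (l : List Char) :
    PySem.Chars.split₀ l = pvWords PySem.Chars.isspace l := by
  unfold PySem.Chars.split₀
  rw [pvSplit₀_go l [] [] []]
  simp

-- single-character replace is map
theorem pvReplace_go (o n : Char) :
    ∀ (fuel : Nat) (l acc : List Char), l.length ≤ fuel →
      PySem.Chars.replace.go [o] [n] fuel l acc =
        acc.reverse ++ l.map (fun c => if c == o then n else c)
  | 0, l, acc, h => by
    have : l = [] := by cases l <;> simp_all
    subst this
    simp [PySem.Chars.replace.go]
  | fuel + 1, [], acc, h => by simp [PySem.Chars.replace.go]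
  | fuel + 1, c :: t, acc, h => by
    by_cases hc : c = o
    · have hpre : [o].isPrefixOf (c :: t) = true := by simp [List.isPrefixOf, hc]
      simp only [PySem.Chars.replace.go, hpre, if_true]
      have hdrop : (c :: t).drop [o].length = t := by simp
      rw [hdrop, pvReplace_go o n fuel t _ (by simp at h ⊢; omega)]
      simp [hc]
    · have hpre : [o].isPrefixOf (c :: t) = false := by
        simp [List.isPrefixOf]
        exact fun h' => absurd h'.symm hc
      simp only [PySem.Chars.replace.go, hpre, Bool.false_eq_true, if_false]
      rw [pvReplace_go o n fuel t _ (by simp at h ⊢; omega)]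
      simp [hc]

theorem pvReplace_eq (o n : Char) (l : List Char) :
    PySem.Chars.replace l [o] [n] = l.map (fun c => if c == o then n else c) := by
  unfold PySem.Chars.replace
  rw [if_neg (by simp)]
  rw [pvReplace_go o n l.length l [] le_rfl]
  simp

-- splitOn [','] computes pvChunks
theorem pvSplitOn_go :
    ∀ (fuel : Nat) (l cur : List Char) (accs : List (List Char)), l.length < fuel →
      PySem.Chars.splitOn.go [','] fuel l cur accs =
        accs.reverse ++ (pvChunks l).modifyHead (cur.reverse ++ ·)
  | 0, l, cur, accs, h => by omega
  | fuel + 1, [], cur, accs, h => by simp [PySem.Chars.splitOn.go, pvChunks]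
  | fuel + 1, c :: rest, cur, accs, h => by
    by_cases hc : c = ','
    · subst hc
      have hpre : [','].isPrefixOf (',' :: rest) = true := by simp [List.isPrefixOf]
      simp only [PySem.Chars.splitOn.go, hpre, if_true]
      have hdrop : (',' :: rest).drop [','].length = rest := by simp
      rw [hdrop, pvSplitOn_go fuel rest [] (cur.reverse :: accs)
        (by simp at h ⊢; omega)]
      have hch : ∀ (x : List (List Char)), x.modifyHead (fun a => a) = x := by
        intro x; cases x <;> simp
      simp [pvChunks, hch]
    · have hpre : [','].isPrefixOf (c :: rest) = false := by
        simp [List.isPrefixOf]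
        exact fun h' => absurd h'.symm hc
      simp only [PySem.Chars.splitOn.go, hpre, Bool.false_eq_true, if_false]
      rw [pvSplitOn_go fuel rest (c :: cur) accs (by simp at h ⊢; omega)]
      cases hx : pvChunks rest with
      | nil => simp [pvChunks, hc, hx]
      | cons y ys => simp [pvChunks, hc, hx]

theorem pvSplitOn_eq (l : List Char) :
    PySem.Chars.splitOn l [','] = pvChunks l := by
  unfold PySem.Chars.splitOn
  rw [pvSplitOn_go (l.length + 1) l [] [] (by omega)]
  have hch : ∀ (x : List (List Char)), x.modifyHead (fun a => a) = x := by
    intro x; cases x <;> simp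
  simp [hch]

-- chunk structure lemmas
theorem pvChunks_no_comma :
    ∀ (l : List Char), (∀ c ∈ l, (c == ',') = false) → pvChunks l = [l]
  | [], _ => rfl
  | c :: r, h => by
    simp only [pvChunks, h c (by simp)]
    rw [pvChunks_no_comma r (fun d hd => h d (by simp [hd]))]
    simp

theorem pvChunks_split :
    ∀ (t : List Char), (∀ c ∈ t, (c == ',') = false) →
      ∀ (r : List Char), pvChunks (t ++ ',' :: r) = t :: pvChunks r
  | [], _, r => by simp [pvChunks]
  | c :: t', h, r => by
    simp only [List.cons_append, pvChunks, h c (by simp)]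
    rw [pvChunks_split t' (fun d hd => h d (by simp [hd])) r]
    simp

-- delimiter-set transfer along a character map
theorem pvWords_map (p q : Char → Bool) (f : Char → Char)
    (h1 : ∀ c, p (f c) = q c) (h2 : ∀ c, q c = false → f c = c) :
    ∀ (l : List Char), pvWords p (l.map f) = pvWords q l
  | [] => by simp [pvWords_nil]
  | c :: r => by
    by_cases hc : q c = true
    · simp only [List.map_cons, pvWords, h1 c, hc, if_true]
      exact pvWords_map p q f h1 h2 r
    · have hfc : f c = c := h2 c (by simpa using hc)
      have htw : (r.map f).takeWhile (fun d => !p d) = r.takeWhile (fun d => !q d) := by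
        rw [List.takeWhile_map]
        have : r.takeWhile ((fun d => !p d) ∘ f) = r.takeWhile (fun d => !q d) := by
          apply pvTakeWhile_congr
          intro d _; simp [Function.comp, h1 d]
        rw [this]
        have hid : ∀ x ∈ r.takeWhile (fun d => !q d), f x = x := by
          intro x hx
          have := List.mem_takeWhile_imp (p := fun d => !q d) hx
          exact h2 x (by simpa using this)
        rw [List.map_congr_left hid]
        simp
      have hdw : (r.map f).dropWhile (fun d => !p d) = (r.dropWhile (fun d => !q d)).map f := by
        rw [List.dropWhile_map]
        congr 1
        apply pvDropWhile_congr
        intro d _; simp [Function.comp, h1 d]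
      have hlen := List.length_dropWhile_le (fun d => !q d) r
      have hpc : p c = false := by rw [← hfc, h1 c]; simpa using hc
      rw [List.map_cons, hfc, pvWords_cons, if_neg (by simp [hpc]), htw, hdw,
          pvWords_map p q f h1 h2 (r.dropWhile (fun d => !q d)),
          pvWords_cons (pr := q) (c := c) (r := r), if_neg (by simp [hc])]
termination_by l => l.length
decreasing_by
  all_goals simp only [List.length_cons]
  · omega
  · have := List.length_dropWhile_le (fun d => !q d) r; omega

-- splitting at commas then at whitespace = splitting at the combined delimiter set
theorem pvChunks_flatMap :
    ∀ (l : List Char), (pvChunks l).flatMap (pvWords PySem.Chars.isspace) = pvWords pvQ l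
  | l => by
    by_cases h : ∀ c ∈ l, (c == ',') = false
    · rw [pvChunks_no_comma l h]
      simp only [List.flatMap_cons, List.flatMap_nil, List.append_nil]
      apply pvWords_congr
      intro c hc
      simp [pvQ, h c hc]
    · push_neg at h
      obtain ⟨c0, hc0, hc0'⟩ := h
      have hdw : l.dropWhile (fun c => !(c == ',')) ≠ [] := by
        intro hnil
        have : l.takeWhile (fun c => !(c == ',')) = l := by
          have := List.takeWhile_append_dropWhile (p := fun c => !(c == ',')) (l := l)
          simpa [hnil] using this
        rw [← this] at hc0
        have := List.mem_takeWhile_imp hc0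
        simp [hc0'] at this
      rcases he : l.dropWhile (fun c => !(c == ',')) with _ | ⟨e, r⟩
      · exact absurd he hdw
      · have he' : e = ',' := by
          have := pvDropWhile_head (fun c => !(c == ',')) l e r he
          simp at this
          exact this
        subst he'
        have hdecomp : l = l.takeWhile (fun c => !(c == ',')) ++ ',' :: r := by
          conv_lhs => rw [← List.takeWhile_append_dropWhile (p := fun c => !(c == ',')) (l := l)]
          rw [he]
        have htall : ∀ c ∈ l.takeWhile (fun c => !(c == ',')), (c == ',') = false := by
          intro c hc
          have := List.mem_takeWhile_imp hc
          simpa using this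
        have hlen : r.length < l.length := by
          have h1 := List.length_dropWhile_le (fun c => !(c == ',')) l
          rw [he] at h1; simp at h1; omega
        show (pvChunks l).flatMap (pvWords PySem.Chars.isspace) = pvWords pvQ l
        conv_lhs => rw [hdecomp]
        rw [pvChunks_split _ htall r]
        simp only [List.flatMap_cons]
        rw [pvChunks_flatMap r]
        conv_rhs => rw [hdecomp]
        rw [pvWords_append_delim pvQ ',' (by simp [pvQ]) _ r]
        congr 1
        apply pvWords_congr
        intro c hc
        simp [pvQ, htall c hc]
termination_by l => l.length

-- the foldl in port A is a flatMap
theorem pvFoldl_flatMap {α β : Type} (g : α → Bool) (f : α → List β) :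
    ∀ (l : List α) (acc : List β),
      l.foldl (fun parts chunk => if g chunk then parts else parts ++ f chunk) acc =
        acc ++ l.flatMap (fun chunk => if g chunk then [] else f chunk)
  | [], acc => by simp
  | c :: r, acc => by
    simp only [List.foldl_cons, List.flatMap_cons]
    rw [pvFoldl_flatMap g f r]
    by_cases hc : g c = true <;> simp [hc]

-- each chunk's contribution in port A is just its word list
theorem pvChunk_contrib (chunk : List Char) :
    (if (PySem.Chars.strip chunk).isEmpty then ([] : List String)
     else ((PySem.Chars.split₀ (PySem.Chars.strip chunk)).filter
       (fun p => !(PySem.Chars.strip p).isEmpty)).map String.ofList) =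
    (pvWords PySem.Chars.isspace chunk).map String.ofList := by
  have hw : pvWords PySem.Chars.isspace (PySem.Chars.strip chunk) =
      pvWords PySem.Chars.isspace chunk :=
    pvWords_strip PySem.Chars.isspace (fun c hc => hc) chunk
  by_cases h : (PySem.Chars.strip chunk).isEmpty = true
  · have hnil : PySem.Chars.strip chunk = [] := by
      cases hp : PySem.Chars.strip chunk <;> simp_all
    rw [if_pos h]
    rw [← hw, hnil]
    simp [pvWords]
  · rw [if_neg h, pvSplit₀_eq, hw]
    congr 1
    apply List.filter_eq_self.mpr
    intro w hwmem
    obtain ⟨hne, hall⟩ := pvWords_mem PySem.Chars.isspace chunk w hwmem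
    rw [pvStrip_eq_self w hall]
    cases w with
    | nil => exact absurd rfl hne
    | cons a b => simp

-- ===== VERDICT (by name: the statement is the Claim_ definition above) =====
theorem parse_allowlist_py_spec : Claim_equal_parse_allowlist_py := by
  intro raw _
  unfold Spec_parse_allowlist_py parse_allowlist_py parse_allowlist_py_alt
  cases raw with
  | none => rfl
  | some s =>
    by_cases hs : s = ""
    · simp [hs]
    · simp only [if_neg hs]
      -- A side
      have hArep : (PySem.Str.replace s "\n" ",").toList =
          s.toList.map (fun c => if c == '\n' then ',' else c) := by
        rw [PySem.Str.toList_replace]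
        simpa using pvReplace_eq '\n' ',' s.toList
      rw [hArep, pvSplitOn_eq]
      rw [pvFoldl_flatMap (fun chunk => (PySem.Chars.strip chunk).isEmpty)
        (fun chunk => ((PySem.Chars.split₀ (PySem.Chars.strip chunk)).filter
          (fun p => !(PySem.Chars.strip p).isEmpty)).map String.ofList)]
      simp only [List.nil_append]
      have hbody : ∀ (cl : List (List Char)),
          cl.flatMap (fun chunk => if (PySem.Chars.strip chunk).isEmpty then []
            else ((PySem.Chars.split₀ (PySem.Chars.strip chunk)).filter
              (fun p => !(PySem.Chars.strip p).isEmpty)).map String.ofList) =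
          (cl.flatMap (pvWords PySem.Chars.isspace)).map String.ofList := by
        intro cl
        rw [List.map_flatMap]
        apply List.flatMap_congr  -- congruence over the chunk list
        intro chunk _
        exact pvChunk_contrib chunk
      rw [hbody, pvChunks_flatMap]
      -- B side
      have hBrep : (PySem.Str.replace s "," " ").toList =
          s.toList.map (fun c => if c == ',' then ' ' else c) := by
        rw [PySem.Str.toList_replace]
        simpa using pvReplace_eq ',' ' ' s.toList
      unfold PySem.Str.split₀
      rw [hBrep, pvSplit₀_eq]
      rw [pvWords_map PySem.Chars.isspace pvQ (fun c => if c == ',' then ' ' else c)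
        (by intro c
            by_cases hc : c = ','
            · subst hc; simp [pvQ]; decide
            · simp [pvQ, hc])
        (by intro c hc
            simp [pvQ] at hc
            simp [hc.2])]
      rw [pvWords_map pvQ pvQ (fun c => if c == '\n' then ',' else c)
        (by intro c
            by_cases hc : c = '\n'
            · subst hc; simp [pvQ]; decide
            · simp [hc])
        (by intro c hc
            by_cases h : c = '\n'
            · subst h; simp [pvQ] at hc; revert hc; decide
            · simp [h])]
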